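-- pv_equiv track=rewrite | github.com/pypi-data/pypi-mirror-290 | packages/rule-evaluator/rule_evaluator-2024.8.12.tar.gz/rule_evaluator-2024.8.12/rule_evaluator/rule_evaluator.py | rule_splitter
-- ===== SOURCE A (Python) =====
-- def rule_splitter(rule: str, split_characters: set = {"+","-",",","(",")", " "}) -> set:
--     """
--     Split rule by characters.
--
--     Args:
--         rule (str): Boolean logical string.
--         split_characters (list): List of characters to split in rule.
--
--     Returns:
--         set: Unique tokens in a rule.
--     """
--     if not isinstance(rule, str):
--         raise ValueError("rule must be a string type")
--     rule_decomposed = str(rule)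
--     if split_characters:
--         for character in split_characters:
--             character = character.strip()
--             if character:
--                 rule_decomposed = rule_decomposed.replace(character, " ")
--     unique_tokens = set(filter(bool, rule_decomposed.split()))
--     return unique_tokens
-- ===== SOURCE B (Python) =====
-- def rule_splitter(rule: str, split_characters: set = {"+", "-", ",", "(", ")", " "}) -> set:
--     """Single pass over the rule: classify each character as delimiter or not,
--     accumulating tokens directly instead of rewriting the string once per separator."""
--     if not isinstance(rule, str):
--         raise ValueError("rule must be a string type")
--     delimiters = {c.strip() for c in split_characters if c.strip()}
--     tokens = set()
--     buf = []
--     for ch in rule: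
--         if ch.isspace() or ch in delimiters:
--             if buf:
--                 tokens.add("".join(buf))
--                 buf = []
--         else:
--             buf.append(ch)
--     if buf:
--         tokens.add("".join(buf))
--     return tokens
-- ===== Notes on version B (the rewrite author's own statement) =====
-- stated objective: alternative
-- what changed: B makes one pass over the rule string, classifying each character as delimiter-or-not against the stripped separator set and accumulating tokens directly, instead of A's rewriting of the whole string once per separator followed by a whitespace split; Pre_ excludes separator entries longer than one character after stripping that can actually match in the rule (the docstring specifies characters, and there A's sequential replaces over an unordered set are in general hash-order dependent).
-- outside the precondition, e.g. on rule_splitter('abcab', {'ab'}): A returns {'c'}, B returns {'abcab'}; on rule_splitter('a b', {'a b'}): A returns set(), B returns {'a', 'b'}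
import Mathlib
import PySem

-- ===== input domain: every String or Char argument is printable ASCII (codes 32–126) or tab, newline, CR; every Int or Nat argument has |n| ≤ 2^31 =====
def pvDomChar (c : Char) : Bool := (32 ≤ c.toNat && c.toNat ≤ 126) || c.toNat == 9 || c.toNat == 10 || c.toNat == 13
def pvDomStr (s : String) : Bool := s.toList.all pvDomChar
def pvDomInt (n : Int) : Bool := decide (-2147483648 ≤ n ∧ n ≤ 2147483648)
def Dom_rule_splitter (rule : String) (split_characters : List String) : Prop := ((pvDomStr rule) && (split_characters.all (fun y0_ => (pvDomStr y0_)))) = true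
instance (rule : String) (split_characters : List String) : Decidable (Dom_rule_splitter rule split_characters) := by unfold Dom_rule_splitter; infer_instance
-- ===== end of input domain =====

-- B replaces A's one-replace-per-separator string rewriting by a single pass over the
-- rule that accumulates tokens directly (objective: alternative single-pass algorithm).

-- ===== PORT A =====
def rule_splitter (rule : String) (split_characters : List String) : List String :=
  let rule_decomposed := rule
  let rule_decomposed :=
    if !split_characters.isEmpty then
      split_characters.foldl (fun rd character =>
        let character := PySem.Str.strip character
        if character ≠ "" then PySem.Str.replace rd character " " else rd) rule_decomposed
    else rule_decomposed
  PySem.Set.ofList ((PySem.Str.split₀ rule_decomposed).filter (fun t => t ≠ ""))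

-- ===== PORT B =====
def rule_splitter_alt (rule : String) (split_characters : List String) : List String :=
  let delimiters : PySem.Set String :=
    PySem.Set.ofList ((split_characters.map PySem.Str.strip).filter (fun c => c ≠ ""))
  let st := rule.toList.foldl (fun (st : PySem.Set String × List Char) ch =>
      if PySem.Chars.isspace ch || PySem.Set.contains delimiters (String.ofList [ch]) then
        (if st.2.isEmpty then st.1 else PySem.Set.add st.1 (String.ofList st.2.reverse), [])
      else (st.1, ch :: st.2)) (PySem.Set.empty, [])
  if st.2.isEmpty then st.1 else PySem.Set.add st.1 (String.ofList st.2.reverse)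

-- ===== PRECONDITION & SPEC =====
-- pvRepl: characters of the rule that may have been turned into a space by A's earlier
-- replaces (a space itself, or a single-character stripped separator)
def pvRepl (split_characters : List String) (c : Char) : Bool :=
  (c == ' ') || ((split_characters.map PySem.Str.strip).filter (fun s => s ≠ "")).contains (String.ofList [c])
-- pvMatch R t l: t matches a prefix of l, spaces of t also matching any char with R c
def pvMatch (R : Char → Bool) : List Char → List Char → Bool
  | [], _ => true
  | _ :: _, [] => false
  | t :: ts, c :: cs => (t == c || (t == ' ' && R c)) && pvMatch R ts cs
-- Pre_ excludes separator lists with a separator longer than one character after stripping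
-- that can actually fire (it matches somewhere in the rule, spaces of the separator matching
-- characters that replaces may already have turned into spaces): A's docstring specifies
-- CHARACTERS to split on, and on such multi-character separators A performs sequential
-- substring replacements over an unordered Python set, so A's result in general depends on
-- set iteration (hash) order — an accident B's simultaneous single-character split does not
-- reproduce; multi-character separators that can never fire stay admitted.
def Pre_rule_splitter (rule : String) (split_characters : List String) : Prop :=
  ∀ s ∈ split_characters, PySem.Str.len (PySem.Str.strip s) ≤ 1 ∨
    rule.toList.tails.any (pvMatch (pvRepl split_characters) (PySem.Str.strip s).toList) = false
instance (rule : String) (split_characters : List String) : Decidable (Pre_rule_splitter rule split_characters) := by unfold Pre_rule_splitter; infer_instance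
def pvWitness_rule_splitter : String × List String := ("a+b-c (d)", ["+", "-", ",", "(", ")", " "])

def Spec_rule_splitter (rule : String) (split_characters : List String) (out : List String) : Prop := out = rule_splitter_alt rule split_characters
instance (rule : String) (split_characters : List String) (out : List String) : Decidable (Spec_rule_splitter rule split_characters out) := by unfold Spec_rule_splitter; infer_instance

-- ===== CLAIM (what is proved, stated in full; the proofs are below) =====
def Claim_equal_rule_splitter : Prop := ∀ (rule : String) (split_characters : List String), Dom_rule_splitter rule split_characters → Pre_rule_splitter rule split_characters → Spec_rule_splitter rule split_characters (rule_splitter rule split_characters)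

-- ===== LEMMAS AND PROOFS =====

-- reference splitter: words of cs split at characters satisfying p (cur is the reversed buffer)
def pvWords (p : Char → Bool) : List Char → List Char → List (List Char)
  | [], cur => if cur.isEmpty then [] else [cur.reverse]
  | c :: rest, cur =>
      if p c then (if cur.isEmpty then pvWords p rest [] else cur.reverse :: pvWords p rest [])
      else pvWords p rest (c :: cur)

lemma pvWords_ne_nil (p : Char → Bool) : ∀ (cs cur : List Char), [] ∉ pvWords p cs cur := by
  intro cs
  induction cs with
  | nil =>
      intro cur
      simp only [pvWords]
      split
      · simp
      · rename_i h
        simp only [List.mem_singleton]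
        intro hc
        apply h
        rw [List.isEmpty_iff, ← List.reverse_eq_nil_iff, hc]
  | cons c rest ih =>
      intro cur
      simp only [pvWords]
      by_cases hp : p c = true
      · simp only [hp, if_true]
        by_cases hcur : cur.isEmpty = true
        · simp only [hcur, if_true]; exact ih []
        · simp only [hcur, Bool.false_eq_true, if_false, List.mem_cons]
          rintro (hc | hc)
          · exact hcur (by rw [List.isEmpty_iff, ← List.reverse_eq_nil_iff, hc])
          · exact ih [] hc
      · simp only [hp]
        exact ih (c :: cur)

-- split₀.go is pvWords with the isspace predicate
lemma split₀_go_eq_words : ∀ (cs cur : List Char) (acc : List (List Char)),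
    PySem.Chars.split₀.go cs cur acc = acc.reverse ++ pvWords PySem.Chars.isspace cs cur := by
  intro cs
  induction cs with
  | nil => intro cur acc; simp only [PySem.Chars.split₀.go, pvWords]; split <;> simp
  | cons c rest ih =>
      intro cur acc
      simp only [PySem.Chars.split₀.go, pvWords]
      split
      · split
        · rw [ih]
        · rw [ih]; simp
      · rw [ih]

-- replacing one character by one character is a pointwise map
lemma replace_go_single (c d : Char) : ∀ (l acc : List Char),
    PySem.Chars.replace.go [c] [d] l.length l acc
      = acc.reverse ++ l.map (fun x => if x = c then d else x) := by
  intro l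
  induction l with
  | nil => intro acc; simp [PySem.Chars.replace.go]
  | cons x t ih =>
      intro acc
      simp only [List.length_cons, PySem.Chars.replace.go, List.isPrefixOf, List.map_cons]
      by_cases hx : x = c
      · simp [hx, ih]
      · have hbe : (c == x) = false := by
          simp only [beq_eq_false_iff_ne, ne_eq]
          exact fun h => hx h.symm
        simp [hbe, ih, hx]

lemma replace_single (s : List Char) (c d : Char) :
    PySem.Chars.replace s [c] [d] = s.map (fun x => if x = c then d else x) := by
  simp [PySem.Chars.replace, replace_go_single]

-- a pattern that never occurs is not replaced
lemma replace_go_noop (old new : List Char) (h0 : old ≠ []) : ∀ (l acc : List Char),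
    ¬ old <:+: l → PySem.Chars.replace.go old new l.length l acc = acc.reverse ++ l := by
  intro l
  induction l with
  | nil => intro acc _; cases old with
    | nil => exact absurd rfl h0
    | cons o ot => simp [PySem.Chars.replace.go]
  | cons x t ih =>
      intro acc hinf
      simp only [List.length_cons, PySem.Chars.replace.go]
      rw [if_neg ?_]
      · rw [ih (x :: acc) (fun h => hinf (List.infix_cons h))]
        simp
      · intro hpre
        exact hinf (List.IsPrefix.isInfix (List.isPrefixOf_iff_prefix.mp hpre))

lemma replace_noop (s old new : List Char) (h0 : old ≠ []) (h : ¬ old <:+: s) :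
    PySem.Chars.replace s old new = s := by
  unfold PySem.Chars.replace
  rw [if_neg (by simpa [List.isEmpty_iff] using h0), replace_go_noop old new h0 s [] h]
  rfl

-- replacing characters by spaces cannot create an occurrence of a pattern that pvMatch rules out
lemma prefix_pmatch (R : Char → Bool) (G : Char → Char)
    (hG : ∀ x, G x = x ∨ (G x = ' ' ∧ R x = true)) :
    ∀ (t l : List Char), t <+: l.map G → pvMatch R t l = true := by
  intro t
  induction t with
  | nil => intro l _; rfl
  | cons t0 ts ih =>
      intro l hp
      cases l with
      | nil => simp at hp
      | cons c cs =>
          simp only [List.map_cons, List.cons_prefix_cons] at hp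
          obtain ⟨h0, h1⟩ := hp
          simp only [pvMatch, Bool.and_eq_true, Bool.or_eq_true]
          refine ⟨?_, ih cs h1⟩
          rcases hG c with h | ⟨h, hR⟩
          · left; simp [h0, h]
          · right; simp [h0, h, hR]

lemma infix_canfire (R : Char → Bool) (G : Char → Char)
    (hG : ∀ x, G x = x ∨ (G x = ' ' ∧ R x = true)) :
    ∀ (t l : List Char), t <:+: l.map G → l.tails.any (pvMatch R t) = true := by
  intro t l
  induction l with
  | nil =>
      intro h
      have ht : t = [] := List.eq_nil_of_infix_nil (by simpa using h)
      simp [ht, pvMatch]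
  | cons c cs ih =>
      intro h
      rw [List.map_cons, List.infix_cons_iff] at h
      rw [List.tails_cons, List.any_cons]
      rcases h with h | h
      · rw [prefix_pmatch R G hG _ _ (by simpa using h)]
        simp
      · rw [ih h]
        simp

-- rewriting only break characters-- rewriting only break characters (to a break character) does not change the word split
lemma words_map (p : Char → Bool) (F : Char → Char)
    (h : ∀ ch, PySem.Chars.isspace (F ch) = p ch ∧ (p ch = false → F ch = ch)) :
    ∀ (cs cur : List Char), pvWords PySem.Chars.isspace (cs.map F) cur = pvWords p cs cur := by
  intro cs
  induction cs with
  | nil => intro cur; rfl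
  | cons c rest ih =>
      intro cur
      simp only [List.map_cons, pvWords, (h c).1]
      by_cases hp : p c = true
      · simp [hp, ih]
      · have hp' : p c = false := by simpa using hp
        simp [hp', (h c).2 hp', ih]

-- B's fused loop computes Set.update over the words
lemma bloop_eq_update (p : Char → Bool) : ∀ (cs : List Char) (s : PySem.Set String) (tok : List Char),
    (if (cs.foldl (fun (st : PySem.Set String × List Char) ch =>
        if p ch then (if st.2.isEmpty then st.1 else PySem.Set.add st.1 (String.ofList st.2.reverse), [])
        else (st.1, ch :: st.2)) (s, tok)).2.isEmpty
     then (cs.foldl (fun (st : PySem.Set String × List Char) ch =>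
        if p ch then (if st.2.isEmpty then st.1 else PySem.Set.add st.1 (String.ofList st.2.reverse), [])
        else (st.1, ch :: st.2)) (s, tok)).1
     else PySem.Set.add (cs.foldl (fun (st : PySem.Set String × List Char) ch =>
        if p ch then (if st.2.isEmpty then st.1 else PySem.Set.add st.1 (String.ofList st.2.reverse), [])
        else (st.1, ch :: st.2)) (s, tok)).1
       (String.ofList (cs.foldl (fun (st : PySem.Set String × List Char) ch =>
        if p ch then (if st.2.isEmpty then st.1 else PySem.Set.add st.1 (String.ofList st.2.reverse), [])
        else (st.1, ch :: st.2)) (s, tok)).2.reverse))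
    = PySem.Set.update s ((pvWords p cs tok).map String.ofList) := by
  intro cs
  induction cs with
  | nil =>
      intro s tok
      simp only [List.foldl_nil, pvWords]
      by_cases ht : tok.isEmpty = true
      · simp [ht, PySem.Set.update]
      · have ht' : tok.isEmpty = false := by simpa using ht
        simp [ht', PySem.Set.update]
  | cons c rest ih =>
      intro s tok
      simp only [List.foldl_cons, pvWords]
      by_cases hp : p c = true
      · by_cases ht : tok.isEmpty = true
        · simp only [hp, if_true, ht, if_true]
          rw [ih]
        · have ht' : tok.isEmpty = false := by simpa using ht
          simp only [hp, if_true, ht', Bool.false_eq_true, if_false, List.map_cons]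
          rw [ih]
          simp [PySem.Set.update]
      · have hp' : p c = false := by simpa using hp
        simp only [hp', Bool.false_eq_true, if_false]
        exact ih s (c :: tok)

-- the pointwise rewrite A's replace loop amounts to, under Pre_
def pvF (ds : List String) (ch : Char) : Char :=
  if String.ofList [ch] ∈ (ds.map PySem.Str.strip).filter (fun c => c ≠ "") then ' ' else ch

lemma pvF_nil (ch : Char) : pvF [] ch = ch := by
  simp [pvF]

lemma pvF_cons_empty (d : String) (rest : List String) (h : PySem.Str.strip d = "")
    (ch : Char) : pvF (d :: rest) ch = pvF rest ch := by
  simp [pvF, h]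

lemma pvF_space (ds : List String) : pvF ds ' ' = ' ' := by
  unfold pvF; split <;> rfl

lemma pvF_cons_single (d : String) (rest : List String) (cd : Char)
    (hstr : PySem.Str.strip d = String.ofList [cd]) (ch : Char) :
    pvF rest (if ch = cd then ' ' else ch) = pvF (d :: rest) ch := by
  have hne : PySem.Str.strip d ≠ "" := by
    rw [hstr]; intro h
    have := congrArg String.toList h; simp at this
  by_cases hch : ch = cd
  · subst hch
    rw [if_pos rfl, pvF_space]
    unfold pvF
    rw [if_pos ?_]
    simp only [List.map_cons, List.filter_cons]
    rw [if_pos (by simpa using hne), hstr]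
    exact List.mem_cons_self
  · rw [if_neg hch]
    have hmk : String.ofList [ch] ≠ PySem.Str.strip d := by
      rw [hstr]; intro h
      exact hch (by have := congrArg String.toList h; simpa using this)
    have hiff : (String.ofList [ch] ∈ ((d :: rest).map PySem.Str.strip).filter (fun c => c ≠ ""))
        ↔ (String.ofList [ch] ∈ (rest.map PySem.Str.strip).filter (fun c => c ≠ "")) := by
      simp only [List.map_cons, List.filter_cons]
      rw [if_pos (by simpa using hne), List.mem_cons]
      exact or_iff_right hmk
    unfold pvF
    by_cases hm : String.ofList [ch] ∈ (rest.map PySem.Str.strip).filter (fun c => c ≠ "")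
    · rw [if_pos hm, if_pos (hiff.mpr hm)]
    · rw [if_neg hm, if_neg (fun h => hm (hiff.mp h))]

lemma pvF_cons_long (d : String) (rest : List String)
    (hlen : 2 ≤ (PySem.Str.strip d).toList.length) (ch : Char) :
    pvF (d :: rest) ch = pvF rest ch := by
  have hne : PySem.Str.strip d ≠ "" := by
    intro h; rw [h] at hlen; simp at hlen
  have hmk : String.ofList [ch] ≠ PySem.Str.strip d := by
    intro h
    have := congrArg (fun s => s.toList.length) h
    simp only [String.toList_ofList, List.length_singleton] at this
    omega
  have hiff : (String.ofList [ch] ∈ ((d :: rest).map PySem.Str.strip).filter (fun c => c ≠ ""))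
      ↔ (String.ofList [ch] ∈ (rest.map PySem.Str.strip).filter (fun c => c ≠ "")) := by
    simp only [List.map_cons, List.filter_cons]
    rw [if_pos (by simpa using hne), List.mem_cons]
    exact or_iff_right hmk
  unfold pvF
  by_cases hm : String.ofList [ch] ∈ (rest.map PySem.Str.strip).filter (fun c => c ≠ "")
  · rw [if_pos (hiff.mpr hm), if_pos hm]
  · rw [if_neg (fun h => hm (hiff.mp h)), if_neg hm]

-- A's replace loop is the pointwise map pvF over the rule, under Pre_
lemma afold_eq_map (cs0 : List Char) (ds : List String) (R : Char → Bool)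
    (hR : ∀ s ∈ ds, ∀ cd, (PySem.Str.strip s).toList = [cd] → R cd = true)
    (hds : ∀ s ∈ ds, PySem.Str.len (PySem.Str.strip s) ≤ 1 ∨
      cs0.tails.any (pvMatch R (PySem.Str.strip s).toList) = false) :
    ∀ (G : Char → Char), (∀ x, G x = x ∨ (G x = ' ' ∧ R x = true)) →
    (ds.foldl (fun rd character =>
        let character := PySem.Str.strip character
        if character ≠ "" then PySem.Str.replace rd character " " else rd)
      (String.ofList (cs0.map G))).toList
      = cs0.map (fun x => pvF ds (G x)) := by
  induction ds with
  | nil =>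
      intro G hG
      simp only [List.foldl_nil, String.toList_ofList]
      exact List.map_congr_left fun x _ => (pvF_nil (G x)).symm
  | cons d rest ih =>
      intro G hG
      have hRrest : ∀ s ∈ rest, ∀ cd, (PySem.Str.strip s).toList = [cd] → R cd = true :=
        fun s hs => hR s (by simp [hs])
      have hrest : ∀ s ∈ rest, PySem.Str.len (PySem.Str.strip s) ≤ 1 ∨
          cs0.tails.any (pvMatch R (PySem.Str.strip s).toList) = false :=
        fun s hs => hds s (by simp [hs])
      have ih' := ih hRrest hrest
      simp only [List.foldl_cons]
      by_cases hne : PySem.Str.strip d = ""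
      · simp only [hne, ne_eq, not_true_eq_false, if_false]
        rw [ih' G hG]
        exact List.map_congr_left fun x _ => (pvF_cons_empty d rest hne (G x)).symm
      · simp only [if_pos hne]
        by_cases h1 : (PySem.Str.strip d).toList.length ≤ 1
        · -- strip d is a single character
          obtain ⟨cd, hcd⟩ : ∃ cd, (PySem.Str.strip d).toList = [cd] := by
            have h0 : (PySem.Str.strip d).toList ≠ [] := by
              intro h
              exact hne (by rw [← String.ofList_toList (s := PySem.Str.strip d), h])
            rcases hl : (PySem.Str.strip d).toList with _ | ⟨a, _ | ⟨b, t⟩⟩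
            · exact absurd hl h0
            · exact ⟨a, rfl⟩
            · rw [hl] at h1; simp at h1
          have hstr : PySem.Str.strip d = String.ofList [cd] := by
            rw [← String.ofList_toList (s := PySem.Str.strip d), hcd]
          have hrepl : PySem.Str.replace (String.ofList (cs0.map G)) (PySem.Str.strip d) " "
              = String.ofList (cs0.map (fun x => if G x = cd then ' ' else G x)) := by
            rw [show PySem.Str.replace (String.ofList (cs0.map G)) (PySem.Str.strip d) " "
                  = String.ofList (PySem.Chars.replace (String.ofList (cs0.map G)).toList
                      (PySem.Str.strip d).toList (" " : String).toList) from rfl]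
            rw [String.toList_ofList, hcd, show (" " : String).toList = [' '] from rfl,
              replace_single, List.map_map]
            rfl
          rw [hrepl]
          have hG' : ∀ x, (if G x = cd then ' ' else G x) = x ∨
              ((if G x = cd then ' ' else G x) = ' ' ∧ R x = true) := by
            intro x
            rcases hG x with h | ⟨h, hR'⟩
            · by_cases hx : G x = cd
              · refine Or.inr ⟨by rw [if_pos hx], ?_⟩
                rw [← h, hx]
                exact hR d (by simp) cd hcd
              · exact Or.inl (by rw [if_neg hx, h])
            · by_cases hx : G x = cd
              · exact Or.inr ⟨by rw [if_pos hx], hR'⟩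
              · exact Or.inr ⟨by rw [if_neg hx, h], hR'⟩
          rw [ih' _ hG']
          exact List.map_congr_left fun x _ => pvF_cons_single d rest cd hstr (G x)
        · -- long separator: it can never fire under Pre_, so its replace is a no-op
          have hfire : cs0.tails.any (pvMatch R (PySem.Str.strip d).toList) = false := by
            rcases hds d (by simp) with h | h
            · exfalso
              rw [PySem.Str.len_eq] at h
              have : (PySem.Str.strip d).toList.length ≤ 1 := by exact_mod_cast h
              exact h1 this
            · exact h
          have h0 : (PySem.Str.strip d).toList ≠ [] := by
            intro h; rw [h] at h1; simp at h1
          have hrepl : PySem.Str.replace (String.ofList (cs0.map G)) (PySem.Str.strip d) " "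
              = String.ofList (cs0.map G) := by
            rw [show PySem.Str.replace (String.ofList (cs0.map G)) (PySem.Str.strip d) " "
                  = String.ofList (PySem.Chars.replace (String.ofList (cs0.map G)).toList
                      (PySem.Str.strip d).toList (" " : String).toList) from rfl]
            rw [String.toList_ofList]
            rw [replace_noop _ _ _ h0 (fun hinf => by
              rw [infix_canfire R G hG _ _ hinf] at hfire
              exact Bool.true_eq_false.mp hfire)]
          rw [hrepl, ih' G hG]
          refine List.map_congr_left fun x _ => ?_
          exact (pvF_cons_long d rest (by omega) (G x)).symm

-- ===== VERDICT (by name: the statement is the Claim_ definition above) =====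
theorem rule_splitter_spec : Claim_equal_rule_splitter := by
  intro rule sc _ hpre
  show rule_splitter rule sc = rule_splitter_alt rule sc
  -- the common predicate
  set ds' := (sc.map PySem.Str.strip).filter (fun c => c ≠ "") with hds'
  have hp : ∀ ch, (PySem.Chars.isspace ch || PySem.Set.contains (PySem.Set.ofList ds') (String.ofList [ch]))
      = (PySem.Chars.isspace ch || decide (String.ofList [ch] ∈ ds')) := by
    intro ch
    congr 1
    simp [PySem.Set.contains, PySem.Set.mem_ofList]
  -- A's side
  have hA : rule_splitter rule sc
      = PySem.Set.ofList ((pvWords (fun ch => PySem.Chars.isspace ch || decide (String.ofList [ch] ∈ ds')) rule.toList []).map String.ofList) := by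
    have hmap : (if !sc.isEmpty then
        sc.foldl (fun rd character =>
          let character := PySem.Str.strip character
          if character ≠ "" then PySem.Str.replace rd character " " else rd) rule
      else rule).toList = rule.toList.map (pvF sc) := by
      by_cases hsc : sc.isEmpty
      · have : sc = [] := List.isEmpty_iff.mp hsc
        subst this
        simp only [List.foldl_nil]
        rw [show pvF [] = fun ch => ch from funext pvF_nil]
        simp
      · simp only [hsc, Bool.not_false, if_true]
        have hR : ∀ s ∈ sc, ∀ cd, (PySem.Str.strip s).toList = [cd] → pvRepl sc cd = true := by
          intro s hs cd hcd
          have hstr : PySem.Str.strip s = String.ofList [cd] := by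
            rw [← String.ofList_toList (s := PySem.Str.strip s), hcd]
          unfold pvRepl
          rw [Bool.or_eq_true]
          right
          rw [List.contains_iff_mem, ← hstr, List.mem_filter]
          refine ⟨List.mem_map.mpr ⟨s, hs, rfl⟩, ?_⟩
          rw [decide_eq_true_eq]
          intro h
          rw [h] at hcd
          simp at hcd
        have hfold := afold_eq_map rule.toList sc (pvRepl sc) hR hpre (fun x => x)
          (fun x => Or.inl rfl)
        rw [show String.ofList (rule.toList.map (fun x => x)) = rule from by
              rw [List.map_id']; exact String.ofList_toList] at hfold
        rw [hfold]
    show PySem.Set.ofList ((PySem.Str.split₀ _).filter (fun t => t ≠ "")) = _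
    rw [show PySem.Str.split₀ = fun s => (PySem.Chars.split₀ s.toList).map String.ofList from rfl]
    simp only
    rw [hmap, PySem.Chars.split₀, split₀_go_eq_words]
    simp only [List.reverse_nil, List.nil_append]
    rw [words_map (fun ch => PySem.Chars.isspace ch || decide (String.ofList [ch] ∈ ds')) (pvF sc) ?_ rule.toList []]
    · congr 1
      rw [List.filter_map, List.filter_eq_self.mpr]
      intro w hw
      have hwne : w ≠ [] := fun h => pvWords_ne_nil _ _ _ (h ▸ hw)
      simp only [Function.comp, ne_eq, decide_not]
      rw [Bool.not_eq_eq_eq_not, Bool.not_true, decide_eq_false_iff_not]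
      intro h
      exact hwne (by have := congrArg String.toList h; simpa using this)
    · intro ch
      constructor
      · simp only [pvF, ← hds']
        by_cases hm : String.ofList [ch] ∈ ds'
        · rw [if_pos hm]
          simp [hm]
          rfl
        · rw [if_neg hm]
          simp [hm]
      · intro h
        simp only [pvF, ← hds']
        rw [if_neg]
        intro hm
        simp [hm] at h
  -- B's side
  have hfun : (fun (st : PySem.Set String × List Char) ch =>
        if PySem.Chars.isspace ch || PySem.Set.contains (PySem.Set.ofList ds') (String.ofList [ch]) then
          (if st.2.isEmpty then st.1 else PySem.Set.add st.1 (String.ofList st.2.reverse), ([] : List Char))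
        else (st.1, ch :: st.2))
      = (fun (st : PySem.Set String × List Char) ch =>
        if PySem.Chars.isspace ch || decide (String.ofList [ch] ∈ ds') then
          (if st.2.isEmpty then st.1 else PySem.Set.add st.1 (String.ofList st.2.reverse), ([] : List Char))
        else (st.1, ch :: st.2)) := by
    funext st ch
    rw [hp ch]
  have hB : rule_splitter_alt rule sc
      = PySem.Set.ofList ((pvWords (fun ch => PySem.Chars.isspace ch || decide (String.ofList [ch] ∈ ds')) rule.toList []).map String.ofList) := by
    show (if (rule.toList.foldl (fun (st : PySem.Set String × List Char) ch =>
        if PySem.Chars.isspace ch || PySem.Set.contains (PySem.Set.ofList ds') (String.ofList [ch]) then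
          (if st.2.isEmpty then st.1 else PySem.Set.add st.1 (String.ofList st.2.reverse), [])
        else (st.1, ch :: st.2)) (PySem.Set.empty, [])).2.isEmpty
      then (rule.toList.foldl (fun (st : PySem.Set String × List Char) ch =>
        if PySem.Chars.isspace ch || PySem.Set.contains (PySem.Set.ofList ds') (String.ofList [ch]) then
          (if st.2.isEmpty then st.1 else PySem.Set.add st.1 (String.ofList st.2.reverse), [])
        else (st.1, ch :: st.2)) (PySem.Set.empty, [])).1
      else PySem.Set.add (rule.toList.foldl (fun (st : PySem.Set String × List Char) ch =>
        if PySem.Chars.isspace ch || PySem.Set.contains (PySem.Set.ofList ds') (String.ofList [ch]) then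
          (if st.2.isEmpty then st.1 else PySem.Set.add st.1 (String.ofList st.2.reverse), [])
        else (st.1, ch :: st.2)) (PySem.Set.empty, [])).1
        (String.ofList (rule.toList.foldl (fun (st : PySem.Set String × List Char) ch =>
        if PySem.Chars.isspace ch || PySem.Set.contains (PySem.Set.ofList ds') (String.ofList [ch]) then
          (if st.2.isEmpty then st.1 else PySem.Set.add st.1 (String.ofList st.2.reverse), [])
        else (st.1, ch :: st.2)) (PySem.Set.empty, [])).2.reverse)) = _
    rw [hfun, bloop_eq_update, PySem.Set.update_empty]
  rw [hA, hB]
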